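-- pv_equiv track=rewrite | github.com/gengqifu/Minos | src/minos/mapping.py | merge_mapping
-- ===== SOURCE A (Python) =====
-- from typing import Dict, List, Tuple
--
-- DEFAULT_REGION_MAP: Dict[str, List[str]] = {
--     "EU": ["GDPR"],
--     "US-CA": ["CCPA/CPRA"],
--     "US": [],
--     "BR": ["LGPD"],
--     "CN": ["PIPL"],
--     "JP": ["APPI"],
-- }
--
-- def merge_mapping(
--     regions: List[str],
--     manual_add: List[str] | None = None,
--     manual_remove: List[str] | None = None,
-- ) -> Tuple[List[str], Dict[str, str]]:
--     """
--     根据地区映射并集法规，支持手动增删，返回最终法规列表和来源标记。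
--     来源标记：
--     - region: 由地区映射产生
--     - manual: 手动添加
--     """
--     manual_add = manual_add or []
--     manual_remove = manual_remove or []
--
--     # 校验地区合法性
--     invalid_regions = [reg for reg in regions if reg not in DEFAULT_REGION_MAP]
--     if invalid_regions:
--         raise ValueError(f"未知地区: {', '.join(invalid_regions)}")
--
--     regs_set: set[str] = set()
--     source_flags: Dict[str, str] = {}
--
--     # 地区映射
--     for region in regions:
--         mapped = DEFAULT_REGION_MAP.get(region, [])
--         for r in mapped:
--             regs_set.add(r)
--             source_flags.setdefault(r, "region")
--
--     # 手动添加
--     for r in manual_add: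
--         regs_set.add(r)
--         source_flags[r] = "manual"
--
--     # 手动移除
--     for r in manual_remove:
--         if r in regs_set:
--             regs_set.remove(r)
--         source_flags.pop(r, None)
--
--     regs_list = sorted(regs_set)
--     return regs_list, source_flags
-- ===== SOURCE B (Python) =====
-- from typing import Dict, List, Tuple
--
-- DEFAULT_REGION_MAP: Dict[str, List[str]] = {
--     "EU": ["GDPR"],
--     "US-CA": ["CCPA/CPRA"],
--     "US": [],
--     "BR": ["LGPD"],
--     "CN": ["PIPL"],
--     "JP": ["APPI"],
-- }
--
-- def merge_mapping(
--     regions: List[str],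
--     manual_add: List[str] | None = None,
--     manual_remove: List[str] | None = None,
-- ) -> Tuple[List[str], Dict[str, str]]:
--     adds = manual_add or []
--     removes = manual_remove or []
--
--     invalid_regions = [reg for reg in regions if reg not in DEFAULT_REGION_MAP]
--     if invalid_regions:
--         raise ValueError(f"未知地区: {', '.join(invalid_regions)}")
--
--     # worklist of candidates: region-mapped regs then manual adds
--     pending = [r for reg in regions for r in DEFAULT_REGION_MAP[reg]] + list(adds)
--     items: List[Tuple[str, str]] = []
--     # nub by filtering: emit the head (unless removed), then strip all of its
--     # later duplicates from the worklist instead of remembering what was seen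
--     while pending:
--         head = pending[0]
--         pending = [c for c in pending[1:] if c != head]
--         if head not in removes:
--             items.append((head, "manual" if head in adds else "region"))
--     flags = dict(items)
--     return sorted(flags), flags
-- ===== Notes on version B (the rewrite author's own statement) =====
-- stated objective: alternative
-- what changed: A's three sequential mutation phases over a seen-set plus a source-flag dict (setdefault, manual override, pop) are replaced by a single worklist loop that dedups by filtering the head's later duplicates out of the remaining candidates and emits each surviving candidate already tagged, with no seen-set or dict mutation.
import Mathlib
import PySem

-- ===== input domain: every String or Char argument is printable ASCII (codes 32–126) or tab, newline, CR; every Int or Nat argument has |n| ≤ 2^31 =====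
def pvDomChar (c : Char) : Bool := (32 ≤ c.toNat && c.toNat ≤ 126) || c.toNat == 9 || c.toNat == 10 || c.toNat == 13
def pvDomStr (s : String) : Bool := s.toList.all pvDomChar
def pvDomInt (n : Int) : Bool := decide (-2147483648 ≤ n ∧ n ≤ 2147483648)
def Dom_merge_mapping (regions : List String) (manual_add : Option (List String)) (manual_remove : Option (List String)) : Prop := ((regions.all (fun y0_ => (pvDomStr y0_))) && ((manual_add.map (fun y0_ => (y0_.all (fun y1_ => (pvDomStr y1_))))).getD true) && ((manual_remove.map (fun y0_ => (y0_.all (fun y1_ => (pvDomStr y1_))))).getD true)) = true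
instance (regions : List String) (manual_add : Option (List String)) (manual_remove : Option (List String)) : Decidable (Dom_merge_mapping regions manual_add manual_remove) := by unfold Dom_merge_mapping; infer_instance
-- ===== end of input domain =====

-- B replaces A's three mutation phases over a seen-set and a source-flag dict (setdefault /
-- manual override / pop) by one worklist loop that dedups by filtering the head's later
-- duplicates out of the remaining candidates and emits each survivor already tagged
-- (objective: alternative).

-- ===== PORT A =====
-- shared module-level constant DEFAULT_REGION_MAP
def pvRegionMap : PySem.Dict String (List String) :=
  PySem.Dict.mk [("EU", ["GDPR"]), ("US-CA", ["CCPA/CPRA"]), ("US", []),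
                 ("BR", ["LGPD"]), ("CN", ["PIPL"]), ("JP", ["APPI"])]

def merge_mapping (regions : List String) (manual_add : Option (List String)) (manual_remove : Option (List String)) : List String × (List (String × String)) :=
  let manual_add := manual_add.getD []
  let manual_remove := manual_remove.getD []
  let invalid_regions := regions.filter (fun reg => !(pvRegionMap.contains reg))
  if invalid_regions = [] then
    -- region mapping: regs_set.add(r); source_flags.setdefault(r, "region")
    let st1 : PySem.Set String × PySem.Dict String String :=
      regions.foldl (fun st region =>
        (PySem.Dict.getD pvRegionMap region []).foldl
          (fun st r => (PySem.Set.add st.1 r, PySem.Dict.setdefault st.2 r "region")) st)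
        (PySem.Set.empty, PySem.Dict.empty)
    -- manual add: regs_set.add(r); source_flags[r] = "manual"
    let st2 := manual_add.foldl
      (fun st r => (PySem.Set.add st.1 r, PySem.Dict.insert st.2 r "manual")) st1
    -- manual remove: if r in regs_set: regs_set.remove(r); source_flags.pop(r, None)
    let st3 := manual_remove.foldl
      (fun st r => ((if PySem.Set.contains st.1 r then PySem.Set.discard st.1 r else st.1),
                    PySem.Dict.erase st.2 r)) st2
    (PySem.List.sorted st3.1 (fun x => x) false, st3.2.items)
  else ([], [])  -- Python raises ValueError here; excluded by Pre_merge_mapping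

-- ===== PORT B =====
-- the while-loop over the worklist 'pending' of Source B: emit the head (unless removed, tagged by
-- manual-add membership), then continue on the remainder with the head's duplicates filtered out
def pvBuild (adds removes : List String) : List String → List (String × String)
  | [] => []
  | head :: rest =>
    let pending := rest.filter (fun c => !(c == head))
    let tail := pvBuild adds removes pending
    if removes.contains head then tail
    else (head, if adds.contains head then "manual" else "region") :: tail
termination_by l => l.length
decreasing_by
  simp only [List.length_unattach, List.length_cons]
  exact Nat.lt_succ_of_le (le_trans (List.length_filter_le _ _) (by simp))

def merge_mapping_alt (regions : List String) (manual_add : Option (List String)) (manual_remove : Option (List String)) : List String × (List (String × String)) :=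
  let adds := manual_add.getD []
  let removes := manual_remove.getD []
  let invalid_regions := regions.filter (fun reg => !(pvRegionMap.contains reg))
  if invalid_regions = [] then
    let items := pvBuild adds removes
      ((regions.flatMap (fun reg => PySem.Dict.getD pvRegionMap reg [])) ++ adds)
    let flags := PySem.Dict.ofList items
    (PySem.List.sorted flags.keys (fun x => x) false, flags.items)
  else ([], [])  -- Python raises ValueError here; excluded by Pre_merge_mapping

-- ===== PRECONDITION & SPEC =====
-- Pre_ excludes exactly the inputs with a region outside DEFAULT_REGION_MAP, on which A raises ValueError.
def Pre_merge_mapping (regions : List String) (manual_add : Option (List String)) (manual_remove : Option (List String)) : Prop :=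
  ∀ reg ∈ regions, reg ∈ (["EU", "US-CA", "US", "BR", "CN", "JP"] : List String)
instance (regions : List String) (manual_add : Option (List String)) (manual_remove : Option (List String)) : Decidable (Pre_merge_mapping regions manual_add manual_remove) := by unfold Pre_merge_mapping; infer_instance

def pvWitness_merge_mapping : List String × Option (List String) × Option (List String) :=
  (["EU", "US-CA"], some ["X"], some ["GDPR"])

def Spec_merge_mapping (regions : List String) (manual_add : Option (List String)) (manual_remove : Option (List String)) (out : List String × (List (String × String))) : Prop := out = merge_mapping_alt regions manual_add manual_remove
instance (regions : List String) (manual_add : Option (List String)) (manual_remove : Option (List String)) (out : List String × (List (String × String))) : Decidable (Spec_merge_mapping regions manual_add manual_remove out) := by unfold Spec_merge_mapping; infer_instance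

-- ===== CLAIM (what is proved, stated in full; the proofs are below) =====
def Claim_equal_merge_mapping : Prop := ∀ (regions : List String) (manual_add : Option (List String)) (manual_remove : Option (List String)), Dom_merge_mapping regions manual_add manual_remove → Pre_merge_mapping regions manual_add manual_remove → Spec_merge_mapping regions manual_add manual_remove (merge_mapping regions manual_add manual_remove)

-- ===== LEMMAS AND PROOFS =====

-- the source-flag dict of A is always the keys list paired with a flag function
def dictOf (s : List String) (G : String → String) : PySem.Dict String String :=
  PySem.Dict.mk (s.map (fun r => (r, G r)))

theorem contains_dictOf (s : List String) (G : String → String) (a : String) :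
    (dictOf s G).contains a = s.contains a := by
  simp only [dictOf, PySem.Dict.contains, List.any_map, List.contains_eq_mem, Function.comp_def]
  by_cases h : a ∈ s
  · simp only [h, decide_true, List.any_eq_true]
    exact ⟨a, h, by simp⟩
  · simp only [h, decide_false, List.any_eq_false]
    intro x hx
    simp only [beq_iff_eq]
    exact fun he => h (he ▸ hx)

-- a nested 'for region: for r in mapped(region)' fold is the fold over the flattened sequence
theorem pv_foldl_nested {σ : Type} (g : String → List String) (f : σ → String → σ) :
    ∀ (l : List String) (st : σ),
      l.foldl (fun st region => (g region).foldl f st) st = (l.flatMap g).foldl f st := by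
  intro l
  induction l with
  | nil => intro st; simp
  | cons a l ih => intro st; simp [List.flatMap_cons, List.foldl_append, ih]

-- region phase: existing keys keep their flag, new keys get "region"
theorem pv_phaseR : ∀ (l : List String) (s : PySem.Set String) (G : String → String), s.Nodup →
    l.foldl (fun st r => (PySem.Set.add st.1 r, PySem.Dict.setdefault st.2 r "region")) (s, dictOf s G)
    = (PySem.Set.update s l,
       dictOf (PySem.Set.update s l) (fun r => if r ∈ s then G r else "region")) := by
  intro l
  induction l with
  | nil =>
    intro s G hs
    simp [PySem.Set.update_nil, dictOf]
    exact fun a ha hna => absurd ha hna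
  | cons a l ih =>
    intro s G hs
    rw [List.foldl_cons, PySem.Set.update_cons]
    by_cases ha : a ∈ s
    · have h1 : PySem.Set.add s a = s := PySem.Set.add_of_mem ha
      have h2 : PySem.Dict.setdefault (dictOf s G) a "region" = dictOf s G := by
        have := contains_dictOf s G a
        simp [PySem.Dict.setdefault, this, ha]
      simp only [h1, h2, ih s G hs]
    · have h1 : PySem.Set.add s a = s ++ [a] := PySem.Set.add_of_not_mem ha
      have h2 : PySem.Dict.setdefault (dictOf s G) a "region"
          = dictOf (s ++ [a]) (fun r => if r = a then "region" else G r) := by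
        simp [PySem.Dict.setdefault, ha, dictOf]
        exact fun r hr h => absurd (h ▸ hr) ha
      rw [h1, h2, ih (s ++ [a]) _ (by simp [List.nodup_append, hs]
                                      exact fun r hr h => ha (h ▸ hr))]
      have hfun : (fun r => if r ∈ s ++ [a] then (if r = a then "region" else G r) else "region")
          = (fun r => if r ∈ s then G r else "region") := by
        funext r
        by_cases hr : r = a
        · subst hr; simp [ha]
        · by_cases hrs : r ∈ s <;> simp [hr, hrs]
      rw [hfun]

-- manual-add phase: added keys get "manual" (overriding), others keep their flag
theorem pv_phaseM : ∀ (l : List String) (s : PySem.Set String) (G : String → String), s.Nodup →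
    l.foldl (fun st r => (PySem.Set.add st.1 r, PySem.Dict.insert st.2 r "manual")) (s, dictOf s G)
    = (PySem.Set.update s l,
       dictOf (PySem.Set.update s l) (fun r => if r ∈ l then "manual" else G r)) := by
  intro l
  induction l with
  | nil => intro s G hs; simp [PySem.Set.update_nil]
  | cons a l ih =>
    intro s G hs
    rw [List.foldl_cons, PySem.Set.update_cons]
    by_cases ha : a ∈ s
    · have h1 : PySem.Set.add s a = s := PySem.Set.add_of_mem ha
      have h2 : PySem.Dict.insert (dictOf s G) a "manual"
          = dictOf s (fun r => if r = a then "manual" else G r) := by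
        simp [PySem.Dict.insert, ha, dictOf]
        exact fun r hr => by by_cases h : r = a <;> simp [h]
      rw [h1, h2, ih s _ hs]
      have hfun : (fun r => if r ∈ l then "manual" else if r = a then "manual" else G r)
          = (fun r => if r ∈ a :: l then "manual" else G r) := by
        funext r
        by_cases h1 : r ∈ l <;> by_cases h2 : r = a <;> simp [h1, h2]
      rw [hfun]
    · have h1 : PySem.Set.add s a = s ++ [a] := PySem.Set.add_of_not_mem ha
      have h2 : PySem.Dict.insert (dictOf s G) a "manual"
          = dictOf (s ++ [a]) (fun r => if r = a then "manual" else G r) := by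
        simp [PySem.Dict.insert, ha, dictOf]
        exact fun r hr h => absurd (h ▸ hr) ha
      rw [h1, h2, ih (s ++ [a]) _ (by simp [List.nodup_append, hs]
                                      exact fun r hr h => ha (h ▸ hr))]
      have hfun : (fun r => if r ∈ l then "manual" else if r = a then "manual" else G r)
          = (fun r => if r ∈ a :: l then "manual" else G r) := by
        funext r
        by_cases h1 : r ∈ l <;> by_cases h2 : r = a <;> simp [h1, h2]
      rw [hfun]

-- manual-remove phase: both components are filtered by non-membership in the removal list
theorem pv_phaseRm : ∀ (l s : List String) (G : String → String),
    l.foldl (fun st r => ((if PySem.Set.contains st.1 r then PySem.Set.discard st.1 r else st.1),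
                          PySem.Dict.erase st.2 r)) (s, dictOf s G)
    = (s.filter (fun r => !(l.contains r)), dictOf (s.filter (fun r => !(l.contains r))) G) := by
  intro l
  induction l with
  | nil => intro s G; simp
  | cons a l ih =>
    intro s G
    rw [List.foldl_cons]
    have h1 : (if PySem.Set.contains s a then PySem.Set.discard s a else s)
        = s.filter (fun y => !(y == a)) := by
      by_cases h : a ∈ s
      · simp [PySem.Set.contains, List.contains_eq_mem, h, PySem.Set.discard]
      · have he : s.filter (fun y => !(y == a)) = s :=
          List.filter_eq_self.mpr (fun y hy => by
            simp only [Bool.not_eq_eq_eq_not, Bool.not_true, beq_eq_false_iff_ne, ne_eq]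
            exact fun hee => h (hee ▸ hy))
        simp [PySem.Set.contains, List.contains_eq_mem, h, he]
    have h2 : PySem.Dict.erase (dictOf s G) a = dictOf (s.filter (fun y => !(y == a))) G := by
      simp [PySem.Dict.erase, dictOf, List.filter_map, Function.comp_def]
    rw [h1, h2, ih]
    have h3 : (s.filter (fun y => !(y == a))).filter (fun r => !(l.contains r))
        = s.filter (fun r => !((a :: l).contains r)) := by
      rw [List.filter_filter]
      exact List.filter_congr (fun r hr => by
        by_cases h4 : r = a <;> by_cases h5 : r ∈ l <;>
          simp [h4, h5, List.contains_eq_mem])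
    rw [h3]

-- B-side: Set.ofList commutes with filter
theorem pv_foldl_add_filter (p : String → Bool) :
    ∀ (l : List String) (s : PySem.Set String),
      (l.filter p).foldl PySem.Set.add (s.filter p) = (l.foldl PySem.Set.add s).filter p := by
  intro l
  induction l with
  | nil => intro s; simp
  | cons x l ih =>
    intro s
    by_cases hp : p x = true
    · have hadd : PySem.Set.add (s.filter p) x = (PySem.Set.add s x).filter p := by
        by_cases hx : x ∈ s
        · rw [PySem.Set.add_of_mem hx, PySem.Set.add_of_mem (by simp [List.mem_filter, hx, hp])]
        · rw [PySem.Set.add_of_not_mem hx,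
              PySem.Set.add_of_not_mem (fun h => hx (List.mem_of_mem_filter h))]
          simp [List.filter_append, hp]
      simp only [List.filter_cons, hp, if_pos, List.foldl_cons]
      rw [hadd, ih]
    · have hp' : p x = false := by simpa using hp
      have hadd : (PySem.Set.add s x).filter p = s.filter p := by
        by_cases hx : x ∈ s
        · rw [PySem.Set.add_of_mem hx]
        · rw [PySem.Set.add_of_not_mem hx]; simp [List.filter_append, hp']
      simp only [List.filter_cons, hp', Bool.false_eq_true, if_false]
      rw [← hadd, ih, List.foldl_cons]

theorem pv_ofList_filter (p : String → Bool) (l : List String) :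
    PySem.Set.ofList (l.filter p) = (PySem.Set.ofList l).filter p := by
  have h := pv_foldl_add_filter p l []
  simpa [PySem.Set.ofList_eq_foldl] using h

-- first-occurrence dedup peels its head and dedups the rest with the head filtered out
theorem pv_dedup_cons (h : String) (t : List String) :
    PySem.List.dedup (h :: t)
      = h :: PySem.List.dedup (t.filter (fun c => !(c == h))) := by
  simp only [PySem.List.dedup_eq_ofList]
  rw [pv_ofList_filter]
  have h1 : PySem.Set.ofList (h :: t) = PySem.Set.update (PySem.Set.ofList [h]) t := by
    have := PySem.Set.ofList_append [h] t
    simpa using this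
  rw [h1, PySem.Set.update_eq_append_filter]
  have h2 : PySem.Set.ofList [h] = [h] := rfl
  rw [h2]
  simp only [List.singleton_append, List.cons.injEq, true_and]
  exact List.filter_congr (fun y _ => by
    by_cases hy : y = h
    · simp [hy]
    · simp [hy])

-- the worklist loop computes the tagged, removal-filtered first-occurrence dedup
theorem pv_build_eq (adds removes : List String) :
    ∀ (n : Nat) (l : List String), l.length ≤ n →
      pvBuild adds removes l
        = ((PySem.List.dedup l).filter (fun r => !(removes.contains r))).map
            (fun r => (r, if adds.contains r then "manual" else "region")) := by
  intro n
  induction n with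
  | zero =>
    intro l hl
    have : l = [] := List.eq_nil_of_length_eq_zero (Nat.le_zero.mp hl)
    subst this
    rw [pvBuild.eq_def]
    simp [PySem.List.dedup]
  | succ n ih =>
    intro l hl
    cases l with
    | nil => rw [pvBuild.eq_def]; simp [PySem.List.dedup]
    | cons head rest =>
      rw [pvBuild.eq_def, pv_dedup_cons]
      dsimp only
      have hlen : (rest.filter (fun c => !(c == head))).length ≤ n :=
        Nat.le_of_lt_succ (Nat.lt_of_le_of_lt (List.length_filter_le _ _)
          (by simpa using hl))
      rw [ih _ hlen]
      by_cases hr : head ∈ removes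
      · simp [hr]
      · simp [hr]

-- dict(items) on a list with distinct keys is that list verbatim
theorem pv_ofList_items (l : List (String × String)) (h : (l.map Prod.fst).Nodup) :
    (PySem.Dict.ofList l).items = l := by
  have h0 : PySem.Dict.ofList l = l.foldl (fun d p => d.insert p.1 p.2) PySem.Dict.empty := rfl
  have h1 := PySem.Dict.items_foldl_insert_fresh (l := l) (k := Prod.fst) (v := Prod.snd)
    (d := PySem.Dict.empty) (by intro a _; exact PySem.Dict.contains_empty _) h
  rw [h0]
  simpa using h1

-- ===== VERDICT (by name: the statement is the Claim_ definition above) =====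
theorem merge_mapping_spec : Claim_equal_merge_mapping := by
  intro regions manual_add manual_remove _ hPre
  show merge_mapping regions manual_add manual_remove = merge_mapping_alt regions manual_add manual_remove
  have hinv : regions.filter (fun reg => !(pvRegionMap.contains reg)) = [] := by
    rw [List.filter_eq_nil_iff]
    intro reg hreg
    have h6 := hPre reg hreg
    simp only [List.mem_cons, List.not_mem_nil, or_false] at h6
    rcases h6 with h | h | h | h | h | h <;> subst h <;> decide
  · simp only [merge_mapping, merge_mapping_alt, hinv, if_pos]
    set adds := manual_add.getD [] with hadds
    set removes := manual_remove.getD [] with hremoves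
    set flat := regions.flatMap (fun reg => PySem.Dict.getD pvRegionMap reg []) with hflat
    -- normal form of A
    rw [pv_foldl_nested]
    have h0 : ((PySem.Set.empty : PySem.Set String), (PySem.Dict.empty : PySem.Dict String String))
        = (([] : List String), dictOf [] (fun _ => "region")) := rfl
    rw [h0, pv_phaseR _ [] _ List.nodup_nil]
    have hf1 : (fun r => if r ∈ ([] : List String) then (fun _ => "region") r else "region")
        = (fun _ => "region") := funext fun r => by simp
    rw [hf1, PySem.Set.update_nil_left,
        pv_phaseM _ _ _ (PySem.Set.nodup_ofList _), pv_phaseRm]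
    -- normal form of B
    have hkept : PySem.Set.update (PySem.Set.ofList flat) adds = PySem.List.dedup (flat ++ adds) := by
      simp [PySem.List.dedup, PySem.Set.ofList_append]
    rw [hkept]
    set kept := (PySem.List.dedup (flat ++ adds)).filter (fun r => !(removes.contains r)) with hkeptdef
    have hbuild : pvBuild adds removes (flat ++ adds)
        = kept.map (fun r => (r, if adds.contains r then "manual" else "region")) :=
      pv_build_eq adds removes (flat ++ adds).length (flat ++ adds) le_rfl
    have hkn : kept.Nodup := List.Nodup.filter _ (PySem.List.nodup_dedup _)
    have hnodup : ((kept.map (fun r => (r, if adds.contains r then "manual" else "region"))).map Prod.fst).Nodup := by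
      simpa [List.map_map, Function.comp_def] using hkn
    rw [hbuild]
    simp only [PySem.Dict.keys]
    rw [pv_ofList_items _ hnodup, List.map_map]
    refine Prod.ext ?_ ?_
    · have hcomp : (Prod.fst ∘ fun r : String => (r, if adds.contains r = true then "manual" else "region")) = fun r => r := rfl
      rw [hcomp]
      simp
    · show (dictOf kept _).items = _
      exact List.map_congr_left (fun r hr => by
        by_cases h : r ∈ adds <;> simp [h, List.contains_eq_mem])
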